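-- pv_equiv track=rewrite | github.com/wyuinche/Problem_Solving | book335_kakao.py | makePoint
-- ===== SOURCE A (Python) =====
-- def makePoint(n, weak_point, p):
--     removed = []
--     result = weak_point[0]
--     maxLen = 0
--
--     for w in weak_point:
--         for i in range(p+1):
--             if (w+i)%n in weak_point:
--                 removed.append((w+i)%n)
--         if len(removed) > maxLen:
--             result = w
--             maxLen = len(removed)
--         removed = []
--     return result
-- ===== SOURCE B (Python) =====
-- def _window_hits(d, p, n):
--     # number of i in 0..p with i % n == d  (0 <= d < n)
--     return (p - d) // n + 1 if d <= p else 0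
--
-- def makePoint(n, weak_point, p):
--     # Score each start w in closed form: weak point q is reached once for each
--     # i in 0..p with (w+i) % n == q, i.e. i congruent to q-w modulo n; only
--     # positions inside the circle (0 <= q < n) can be reached at all.
--     targets = {q for q in weak_point if 0 <= q < n}
--     result = weak_point[0]
--     best = 0
--     for w in weak_point:
--         cnt = sum(_window_hits((q - w) % n, p, n) for q in targets)
--         if cnt > best:
--             result = w
--             best = cnt
--     return result
-- ===== Notes on version B (the rewrite author's own statement) =====
-- stated objective: faster
-- what changed: Instead of scanning i=0..p and testing list membership for every start w, B scores each start in closed form per distinct reachable weak point q, counting the arithmetic progression of hits i in [0,p] with (w+i)%n == q as (p-(q-w)%n)//n+1; Pre_ restricts to the natural domain n > 0 with a nonempty list, because A raises on an empty list (IndexError) and on n = 0 with p >= 0 (ZeroDivisionError), A's return of weak_point[0] at n = 0 with p < 0 is an accident of the empty range, and a negative n is not a meaningful circle size (A's values there follow Python's negative-divisor modulo).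
-- outside the precondition, e.g. on makePoint(-4, [2, 3, 0, 1], 0): A returns 0, B returns 2; on makePoint(0, [2, 6], -3): A returns 2, B returns 2; on makePoint(-3, [0, -1], 1): A returns -1, B returns 0
import Mathlib
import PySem

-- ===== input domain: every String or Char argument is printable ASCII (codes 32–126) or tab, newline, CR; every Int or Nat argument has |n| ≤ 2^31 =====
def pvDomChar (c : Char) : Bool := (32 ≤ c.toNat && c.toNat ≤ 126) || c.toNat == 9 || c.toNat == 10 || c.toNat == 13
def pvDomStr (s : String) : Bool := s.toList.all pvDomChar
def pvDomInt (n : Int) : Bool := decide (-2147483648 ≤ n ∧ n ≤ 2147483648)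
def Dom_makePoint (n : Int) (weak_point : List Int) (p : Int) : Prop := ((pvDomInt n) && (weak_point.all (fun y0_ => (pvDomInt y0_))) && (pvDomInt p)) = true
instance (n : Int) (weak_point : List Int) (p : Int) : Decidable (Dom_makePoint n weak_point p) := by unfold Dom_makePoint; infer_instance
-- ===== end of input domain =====

-- B replaces A's per-start scan of i = 0..p (with a list-membership test each step)
-- by a closed-form arithmetic-progression count per distinct weak point; measurably faster.

-- ===== PORT A =====
def makePoint (n : Int) (weak_point : List Int) (p : Int) : Int :=
  let result0 : Int := (PySem.List.pyGet? weak_point 0).getD 0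
  (weak_point.foldl (fun (st : Int × Int) w =>
      let removed := (PySem.List.pyRange 0 (p+1) 1).foldl
        (fun rm i => if PySem.Int.mod (w+i) n ∈ weak_point then rm ++ [PySem.Int.mod (w+i) n] else rm)
        ([] : List Int)
      if (removed.length : Int) > st.2 then (w, (removed.length : Int)) else st)
    (result0, 0)).1

-- ===== PORT B =====
def windowHits (d p n : Int) : Int :=
  if d ≤ p then PySem.Int.floordiv (p - d) n + 1 else 0

def makePoint_alt (n : Int) (weak_point : List Int) (p : Int) : Int :=
  let targets : PySem.Set Int := PySem.Set.ofList (weak_point.filter (fun q => decide (0 ≤ q ∧ q < n)))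
  let result0 : Int := (PySem.List.pyGet? weak_point 0).getD 0
  (weak_point.foldl (fun (st : Int × Int) w =>
      let cnt : Int := (targets.map (fun q => windowHits (PySem.Int.mod (q - w) n) p n)).sum
      if cnt > st.2 then (w, cnt) else st)
    (result0, 0)).1

-- ===== PRECONDITION & SPEC =====
-- Pre_ restricts to the problem's natural domain: 0 < n (a circle of n positions;
-- A raises ZeroDivisionError for n = 0 with p ≥ 0, its return of weak_point[0] at
-- n = 0 with p < 0 is an accident of the empty range, and a negative n is no
-- circle size — A's values there follow Python's negative-divisor modulo) and a
-- nonempty list (A raises IndexError on weak_point[0]).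
def Pre_makePoint (n : Int) (weak_point : List Int) (p : Int) : Prop :=
  0 < n ∧ weak_point ≠ []
instance (n : Int) (weak_point : List Int) (p : Int) : Decidable (Pre_makePoint n weak_point p) := by unfold Pre_makePoint; infer_instance
def pvWitness_makePoint : Int × List Int × Int := (4, ([1, 3, 0] : List Int), 5)

def Spec_makePoint (n : Int) (weak_point : List Int) (p : Int) (out : Int) : Prop := out = makePoint_alt n weak_point p
instance (n : Int) (weak_point : List Int) (p : Int) (out : Int) : Decidable (Spec_makePoint n weak_point p out) := by unfold Spec_makePoint; infer_instance

-- ===== CLAIM (what is proved, stated in full; the proofs are below) =====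
def Claim_equal_makePoint : Prop := ∀ (n : Int) (weak_point : List Int) (p : Int), Dom_makePoint n weak_point p → Pre_makePoint n weak_point p → Spec_makePoint n weak_point p (makePoint n weak_point p)

-- ===== LEMMAS AND PROOFS =====

-- Length of A's append-if loop is a countP.
theorem pvLenFoldlAppendIf {α β : Type} (P : α → Prop) [DecidablePred P] (f : α → β)
    (R : List α) (acc : List β) :
    (R.foldl (fun rm i => if P i then rm ++ [f i] else rm) acc).length
      = acc.length + R.countP (fun i => decide (P i)) := by
  induction R generalizing acc with
  | nil => simp
  | cons a R ih =>
    simp only [List.foldl_cons, List.countP_cons]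
    by_cases h : P a
    · rw [if_pos h, ih]; simp [h]; omega
    · rw [if_neg h, ih]; simp [h]

-- Sum of an equality indicator over a duplicate-free list is a membership indicator.
theorem pvSumIteEqMem (S : List Int) (hS : S.Nodup) (x : Int) :
    (S.map (fun q => if x = q then (1 : Int) else 0)).sum = if x ∈ S then 1 else 0 := by
  induction S with
  | nil => simp
  | cons a S ih =>
    rcases List.nodup_cons.mp hS with ⟨ha, hnd⟩
    simp only [List.map_cons, List.sum_cons, List.mem_cons]
    by_cases hx : x = a
    · subst hx; simp [ha, ih hnd]
    · simp [hx, ih hnd]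

-- Partition a membership count over the distinct targets.
theorem pvCountPMemEqSum (f : Int → Int) (R S : List Int) (hS : S.Nodup) :
    ((R.countP (fun i => decide (f i ∈ S)) : Nat) : Int)
      = (S.map (fun q => ((R.countP (fun i => decide (f i = q)) : Nat) : Int))).sum := by
  induction R with
  | nil => simp
  | cons i R ih =>
    simp only [List.countP_cons]
    push_cast
    simp only [decide_eq_true_eq]
    rw [ih, PySem.List.sum_map_add_int S _ (fun q => if f i = q then (1:Int) else 0),
      pvSumIteEqMem S hS (f i)]

-- (t)/m = (t-1)/m + [m ∣ t]  for 0 < m, 1 ≤ t.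
theorem pvSuccEdiv (m t : Int) (hm : 0 < m) (ht : 1 ≤ t) :
    t / m = (t-1)/m + if m ∣ t then 1 else 0 := by
  obtain ⟨u, rfl⟩ := Int.eq_ofNat_of_zero_le (by omega : (0:Int) ≤ t)
  obtain ⟨v, rfl⟩ := Int.eq_ofNat_of_zero_le (by omega : (0:Int) ≤ m)
  have hu : 1 ≤ u := by exact_mod_cast ht
  have h1 : ((u:Int) - 1) = ((u - 1 : Nat) : Int) := by omega
  rw [h1, ← Int.natCast_div, ← Int.natCast_div]
  have h2 : u = (u - 1) + 1 := by omega
  rw [show u / v = ((u-1)+1) / v from by rw [← h2], Nat.succ_div, ← h2]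
  push_cast
  by_cases hd : v ∣ u
  · rw [if_pos hd, if_pos (Int.natCast_dvd_natCast.mpr hd)]
  · rw [if_neg hd, if_neg (fun h => hd (Int.natCast_dvd_natCast.mp h))]

-- Count of k < N with k % m = r, in closed form.
theorem pvCountRange (m r : Int) (hm : 0 < m) (hr0 : 0 ≤ r) (hrm : r < m) (N : Nat) :
    (((List.range N).countP (fun k : Nat => decide ((k : Int) % m = r)) : Nat) : Int)
      = if r ≤ (N : Int) - 1 then ((N : Int) - 1 - r)/m + 1 else 0 := by
  induction N with
  | zero => rw [if_neg (by push_cast; omega)]; simp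
  | succ N ih =>
    rw [List.range_succ, List.countP_append]
    push_cast
    have hsing : ((([N] : List Nat).countP (fun k : Nat => decide ((k : Int) % m = r)) : Nat) : Int)
        = if (N : Int) % m = r then 1 else 0 := by
      by_cases h : (N : Int) % m = r <;> simp [h]
    rw [ih, hsing]
    by_cases h1 : r ≤ (N:Int) - 1
    · rw [if_pos h1]
      have hiff : (N : Int) % m = r ↔ m ∣ ((N:Int) - r) := by
        rw [show r = r % m from (Int.emod_eq_of_lt hr0 hrm).symm, Int.emod_eq_emod_iff_emod_sub_eq_zero,
          Int.emod_eq_of_lt hr0 hrm]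
        constructor
        · exact Int.dvd_of_emod_eq_zero
        · exact Int.emod_eq_zero_of_dvd
      have hsucc := pvSuccEdiv m ((N:Int) - r) hm (by omega)
      rw [if_pos (show r ≤ (N:Int) + 1 - 1 from by omega),
        show (N:Int) + 1 - 1 - r = (N:Int) - r from by ring, hsucc]
      by_cases hd : m ∣ ((N:Int) - r)
      · rw [if_pos hd, if_pos (hiff.mpr hd), show (N:Int) - 1 - r = (N:Int) - r - 1 from by ring]
      · rw [if_neg hd, if_neg (fun h => hd (hiff.mp h)),
          show (N:Int) - 1 - r = (N:Int) - r - 1 from by ring]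
        ring
    · rw [if_neg h1]
      by_cases h2 : (N:Int) = r
      · rw [if_pos (show (N:Int) % m = r from by rw [← h2]; exact Int.emod_eq_of_lt (by omega) (by omega)),
          if_pos (show r ≤ (N:Int) + 1 - 1 from by omega),
          show (N:Int) + 1 - 1 - r = 0 from by omega]
        simp
      · have hr : (N : Int) % m ≠ r := by
          rw [Int.emod_eq_of_lt (by omega) (by omega)]; omega
        rw [if_neg hr, if_neg (show ¬ r ≤ (N:Int) + 1 - 1 from by omega)]
        simp

-- For 0 < n and canonical q, Python's (w+i)%n = q iff i ≡ q-w (mod n).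
theorem pvFmodEqIff (n : Int) (hn : 0 < n) (w i q : Int) (hq : 0 ≤ q ∧ q < n) :
    PySem.Int.mod (w+i) n = q ↔ i % n = (q - w) % n := by
  rw [PySem.Int.mod_eq_emod_of_pos hn]
  have hqq : q % n = q := Int.emod_eq_of_lt hq.1 hq.2
  constructor
  · intro h
    rw [Int.emod_eq_emod_iff_emod_sub_eq_zero, show i - (q - w) = w + i - q from by ring,
      ← Int.emod_eq_emod_iff_emod_sub_eq_zero, h, hqq]
  · intro h
    have h2 : (w + i) % n = q % n := by
      rw [Int.emod_eq_emod_iff_emod_sub_eq_zero, show w + i - q = i - (q - w) from by ring,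
        ← Int.emod_eq_emod_iff_emod_sub_eq_zero]
      exact h
    rw [h2, hqq]

-- Per-target closed-form count of A's hits.
theorem pvCountAq (n : Int) (hn : 0 < n) (w q p : Int) (hq : 0 ≤ q ∧ q < n) :
    (((PySem.List.pyRange 0 (p+1) 1).countP (fun i => decide (PySem.Int.mod (w+i) n = q)) : Nat) : Int)
      = if PySem.Int.mod (q-w) n ≤ p then (PySem.Int.floordiv (p - PySem.Int.mod (q-w) n) n) + 1 else 0 := by
  rw [PySem.Int.mod_eq_emod_of_pos hn, PySem.Int.floordiv_eq_ediv_of_pos hn]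
  have hr0 : 0 ≤ (q - w) % n := Int.emod_nonneg _ (by omega)
  have hrm : (q - w) % n < n := Int.emod_lt_of_pos _ hn
  rw [PySem.List.pyRange_one, List.countP_map]
  have hcong : List.countP ((fun i => decide (PySem.Int.mod (w+i) n = q)) ∘ (fun k : Nat => (0:Int) + (k:Int)))
        (List.range (p+1-0).toNat)
      = List.countP (fun k : Nat => decide (((k:Nat):Int) % n = (q - w) % n)) (List.range (p+1-0).toNat) := by
    apply List.countP_congr
    intro k _
    simp only [Function.comp_apply, zero_add, decide_eq_true_eq]
    exact pvFmodEqIff n hn w (k : Int) q hq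
  rw [hcong, pvCountRange n ((q - w) % n) hn hr0 hrm ((p+1-0).toNat)]
  by_cases hp : (q - w) % n ≤ p
  · have hN : (((p+1-0).toNat : Nat) : Int) = p + 1 := by omega
    rw [if_pos (by omega), hN, show p + 1 - 1 - (q - w) % n = p - (q - w) % n from by ring,
      if_pos hp]
  · rw [if_neg (by omega), if_neg hp]

-- A's inner loop length equals B's inner closed-form sum, for every start w.
theorem pvInnerEq (n : Int) (hn : 0 < n) (wp : List Int) (w p : Int) :
    ((((PySem.List.pyRange 0 (p+1) 1).foldl
        (fun rm i => if PySem.Int.mod (w+i) n ∈ wp then rm ++ [PySem.Int.mod (w+i) n] else rm)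
        ([] : List Int)).length : Nat) : Int)
      = ((PySem.Set.ofList (wp.filter (fun q => decide (0 ≤ q ∧ q < n)))).map
          (fun q => windowHits (PySem.Int.mod (q - w) n) p n)).sum := by
  rw [pvLenFoldlAppendIf (fun i => PySem.Int.mod (w+i) n ∈ wp)
      (fun i => PySem.Int.mod (w+i) n)]
  simp only [List.length_nil, zero_add]
  have hmem : ((PySem.List.pyRange 0 (p+1) 1).countP (fun i => decide (PySem.Int.mod (w+i) n ∈ wp)) : Int)
      = ((PySem.List.pyRange 0 (p+1) 1).countP (fun i => decide (PySem.Int.mod (w+i) n ∈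
          PySem.Set.ofList (wp.filter (fun q => decide (0 ≤ q ∧ q < n))))) : Int) := by
    congr 1
    apply List.countP_congr
    intro i _
    have hcanon : 0 ≤ PySem.Int.mod (w+i) n ∧ PySem.Int.mod (w+i) n < n := by
      rw [PySem.Int.mod_eq_emod_of_pos hn]
      exact ⟨Int.emod_nonneg _ (by omega), Int.emod_lt_of_pos _ hn⟩
    simp [PySem.Set.mem_ofList, List.mem_filter, hcanon]
  rw [hmem, pvCountPMemEqSum (fun i => PySem.Int.mod (w+i) n) _ _
      (PySem.Set.nodup_ofList (wp.filter (fun q => decide (0 ≤ q ∧ q < n))))]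
  congr 1
  apply List.map_congr_left
  intro q hqS
  have hq : 0 ≤ q ∧ q < n := by
    have h : q ∈ wp ∧ 0 ≤ q ∧ q < n := by
      simpa [PySem.Set.mem_ofList, List.mem_filter] using hqS
    exact h.2
  rw [pvCountAq n hn w q p hq]
  unfold windowHits
  rfl

-- ===== VERDICT (by name: the statement is the Claim_ definition above) =====
theorem makePoint_spec : Claim_equal_makePoint := by
  intro n wp p _ hpre
  obtain ⟨hn, -⟩ := hpre
  show makePoint n wp p = makePoint_alt n wp p
  unfold makePoint makePoint_alt
  have hfun : (fun (st : Int × Int) w =>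
        let removed := (PySem.List.pyRange 0 (p+1) 1).foldl
          (fun rm i => if PySem.Int.mod (w+i) n ∈ wp then rm ++ [PySem.Int.mod (w+i) n] else rm)
          ([] : List Int)
        if (removed.length : Int) > st.2 then (w, (removed.length : Int)) else st)
      = (fun (st : Int × Int) w =>
        let cnt : Int := ((PySem.Set.ofList (wp.filter (fun q => decide (0 ≤ q ∧ q < n)))).map
          (fun q => windowHits (PySem.Int.mod (q - w) n) p n)).sum
        if cnt > st.2 then (w, cnt) else st) := by
    funext st w
    simp only
    rw [pvInnerEq n hn wp w p]
  simp only
  rw [hfun]
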